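-- pv_equiv track=rewrite | github.com/zeroq/cuckoo | modules/processing/createSummary.py | getSourceDestination
-- ===== SOURCE A (Python) =====
-- def getSourceDestination(parts):
--     src = None
--     dst = None
--     for item in parts:
--         if item.lower().startswith("existingfilename->"):
--             src = item.split('->')[1].replace('\\\\', '\\')
--         elif item.lower().startswith("newfilename->"):
--             dst = item.split('->')[1].replace('\\\\', '\\')
--     return src, dst
-- ===== SOURCE B (Python) =====
-- def getSourceDestination(parts):
--     # Build an index of pre-'->' keys (lowercased) to post-'->' values in one
--     # generic pass, then look the two keys up; last occurrence wins via overwrite.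
--     table = {}
--     for item in parts:
--         segs = item.split('->')
--         if len(segs) >= 2:
--             table[segs[0].lower()] = segs[1].replace('\\\\', '\\')
--     return table.get('existingfilename'), table.get('newfilename')
-- ===== Notes on version B (the rewrite author's own statement) =====
-- stated objective: alternative
-- what changed: B replaces A's two hard-coded lowercase-prefix branch tests by a generic index build: one pass stores every item's lowercased pre-'->' segment as a dict key mapped to its backslash-normalised second segment (last occurrence wins by overwrite), and the result is two dict lookups.
import Mathlib
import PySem

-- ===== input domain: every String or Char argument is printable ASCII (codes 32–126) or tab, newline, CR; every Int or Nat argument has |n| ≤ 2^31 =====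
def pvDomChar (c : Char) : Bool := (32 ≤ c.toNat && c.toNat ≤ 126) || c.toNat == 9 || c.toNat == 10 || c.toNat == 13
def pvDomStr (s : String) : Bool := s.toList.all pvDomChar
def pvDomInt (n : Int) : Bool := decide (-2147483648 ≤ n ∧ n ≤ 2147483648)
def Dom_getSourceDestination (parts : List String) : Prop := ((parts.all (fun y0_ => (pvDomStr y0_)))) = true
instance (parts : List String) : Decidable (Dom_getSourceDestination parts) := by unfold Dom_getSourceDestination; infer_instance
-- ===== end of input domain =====

-- B replaces A's two hard-coded conditional branches by a generic index: one pass
-- builds a dict from each lowercased pre-'->' key to its post-'->' value, then the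
-- two keys are looked up (objective: alternative decomposition, same cost).

-- ===== PORT A =====
-- item.split('->')[1].replace('\\\\', '\\')  (only evaluated under a branch test that guarantees the index exists)
def pvAVal (item : String) : String :=
  PySem.Str.replace ((PySem.List.pyGet? ((PySem.Str.split? item "->").getD []) 1).getD "") "\\\\" "\\"

def pvAStep (st : Option String × Option String) (item : String) : Option String × Option String :=
  if PySem.Str.startswith (PySem.Str.lower item) "existingfilename->" then
    (some (pvAVal item), st.2)
  else if PySem.Str.startswith (PySem.Str.lower item) "newfilename->" then
    (st.1, some (pvAVal item))
  else st

def getSourceDestination (parts : List String) : Option String × Option String :=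
  parts.foldl pvAStep (none, none)

-- ===== PORT B =====
def pvBStep (d : PySem.Dict String String) (item : String) : PySem.Dict String String :=
  let segs := (PySem.Str.split? item "->").getD []
  if 2 ≤ segs.length then
    d.insert (PySem.Str.lower ((PySem.List.pyGet? segs 0).getD ""))
             (PySem.Str.replace ((PySem.List.pyGet? segs 1).getD "") "\\\\" "\\")
  else d

def getSourceDestination_alt (parts : List String) : Option String × Option String :=
  let table := parts.foldl pvBStep (∅ : PySem.Dict String String)
  (table.get? "existingfilename", table.get? "newfilename")

-- ===== PRECONDITION & SPEC =====
def Spec_getSourceDestination (parts : List String) (out : Option String × Option String) : Prop := out = getSourceDestination_alt parts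
instance (parts : List String) (out : Option String × Option String) : Decidable (Spec_getSourceDestination parts out) := by unfold Spec_getSourceDestination; infer_instance

-- ===== CLAIM (what is proved, stated in full; the proofs are below) =====
def Claim_equal_getSourceDestination : Prop := ∀ (parts : List String), Dom_getSourceDestination parts → Spec_getSourceDestination parts (getSourceDestination parts)

-- ===== LEMMAS AND PROOFS =====

-- lowercasing a character cannot produce '-' or '>' from any other character
theorem pvLowerChar_dash {c : Char} (h : PySem.Chars.lowerChar c = '-') : c = '-' := by
  unfold PySem.Chars.lowerChar at h
  split_ifs at h with hu
  · exfalso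
    simp [PySem.Chars.isupper, Char.le_def, UInt32.le_iff_toNat_le] at hu
    have hb : 65 ≤ c.toNat ∧ c.toNat ≤ 90 := ⟨hu.1, hu.2⟩
    have ht := congrArg Char.toNat h
    rw [Char.toNat_ofNat] at ht
    have hv : (c.toNat + 32).isValidChar := by
      left; omega
    rw [if_pos hv] at ht
    rw [show ('-').toNat = 45 from rfl] at ht
    omega
  · exact h

theorem pvLowerChar_gt {c : Char} (h : PySem.Chars.lowerChar c = '>') : c = '>' := by
  unfold PySem.Chars.lowerChar at h
  split_ifs at h with hu
  · exfalso
    simp [PySem.Chars.isupper, Char.le_def, UInt32.le_iff_toNat_le] at hu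
    have hb : 65 ≤ c.toNat ∧ c.toNat ≤ 90 := ⟨hu.1, hu.2⟩
    have ht := congrArg Char.toNat h
    rw [Char.toNat_ofNat] at ht
    have hv : (c.toNat + 32).isValidChar := by
      left; omega
    rw [if_pos hv] at ht
    rw [show ('>').toNat = 62 from rfl] at ht
    omega
  · exact h

-- splitOn.go: the accumulator is a reversed prefix of the result
theorem pvGo_acc (fuel : Nat) (l cur : List Char) (acc : List (List Char)) :
    PySem.Chars.splitOn.go ['-','>'] fuel l cur acc
      = acc.reverse ++ PySem.Chars.splitOn.go ['-','>'] fuel l cur [] := by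
  induction fuel generalizing l cur acc with
  | zero => simp [PySem.Chars.splitOn.go]
  | succ n ih =>
    cases l with
    | nil => simp [PySem.Chars.splitOn.go]
    | cons c rest =>
      rw [PySem.Chars.splitOn.go]
      rw [PySem.Chars.splitOn.go]
      by_cases hp : ['-','>'].isPrefixOf (c :: rest) = true
      · rw [if_pos hp, if_pos hp, ih _ _ (cur.reverse :: acc), ih _ _ [cur.reverse]]
        simp
      · rw [if_neg hp, if_neg hp]
        exact ih _ _ acc

theorem pvGo_nil (fuel : Nat) (cur : List Char) :
    PySem.Chars.splitOn.go ['-','>'] fuel [] cur [] = [cur.reverse] := by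
  cases fuel <;> simp [PySem.Chars.splitOn.go]

-- splitOn.go does not depend on the fuel, given enough of it
theorem pvGo_fuel_aux (n : Nat) : ∀ (l : List Char), l.length ≤ n →
    ∀ (fuel fuel' : Nat) (cur : List Char), l.length ≤ fuel → l.length ≤ fuel' →
    PySem.Chars.splitOn.go ['-','>'] fuel l cur []
      = PySem.Chars.splitOn.go ['-','>'] fuel' l cur [] := by
  induction n with
  | zero =>
    intro l hl fuel fuel' cur _ _
    have : l = [] := List.length_eq_zero_iff.mp (Nat.le_zero.mp hl)
    subst this
    rw [pvGo_nil, pvGo_nil]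
  | succ n ih =>
    intro l hl fuel fuel' cur hf hf'
    cases l with
    | nil => rw [pvGo_nil, pvGo_nil]
    | cons c rest =>
      cases fuel with
      | zero => simp at hf
      | succ m =>
        cases fuel' with
        | zero => simp at hf'
        | succ m' =>
          rw [PySem.Chars.splitOn.go]
          conv_rhs => rw [PySem.Chars.splitOn.go]
          by_cases hp : ['-','>'].isPrefixOf (c :: rest) = true
          · rw [if_pos hp, if_pos hp,
              pvGo_acc m _ _ [cur.reverse], pvGo_acc m' _ _ [cur.reverse]]
            have hd : (List.drop (['-','>'] : List Char).length (c :: rest)).length ≤ n := by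
              simp at hl ⊢; omega
            have hx : (List.drop (['-','>'] : List Char).length (c :: rest)).length ≤ m := by
              simp at hf ⊢; omega
            have hy : (List.drop (['-','>'] : List Char).length (c :: rest)).length ≤ m' := by
              simp at hf' ⊢; omega
            rw [ih _ hd m m' [] hx hy]
          · rw [if_neg hp, if_neg hp]
            have hr : rest.length ≤ n := by simp at hl; omega
            exact ih rest hr m m' (c :: cur) (by simp at hf; omega) (by simp at hf'; omega)

theorem pvGo_fuel (fuel fuel' : Nat) (l cur : List Char) (h : l.length ≤ fuel) (h' : l.length ≤ fuel') :
    PySem.Chars.splitOn.go ['-','>'] fuel l cur []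
      = PySem.Chars.splitOn.go ['-','>'] fuel' l cur [] :=
  pvGo_fuel_aux l.length l (Nat.le_refl _) fuel fuel' cur h h'

-- splitOn.go returns at least one piece
theorem pvGo_ne (fuel : Nat) (l cur : List Char) :
    PySem.Chars.splitOn.go ['-','>'] fuel l cur [] ≠ [] := by
  induction fuel generalizing l cur with
  | zero => simp [PySem.Chars.splitOn.go]
  | succ n ih =>
    cases l with
    | nil => simp [PySem.Chars.splitOn.go]
    | cons c rest =>
      rw [PySem.Chars.splitOn.go]
      by_cases hp : ['-','>'].isPrefixOf (c :: rest) = true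
      · rw [if_pos hp, pvGo_acc]
        simp
      · rw [if_neg hp]
        exact ih _ _

-- consuming a separator-free prefix a followed by the separator
theorem pvGo_skip (a : List Char) (fuel : Nat) (t cur : List Char)
    (hf : (a ++ ['-','>'] ++ t).length ≤ fuel) (ha : '-' ∉ a) :
    PySem.Chars.splitOn.go ['-','>'] fuel (a ++ ['-','>'] ++ t) cur []
      = (cur.reverse ++ a) :: PySem.Chars.splitOn t ['-','>'] := by
  induction a generalizing fuel cur with
  | nil =>
    simp only [List.nil_append, List.cons_append] at hf ⊢
    cases fuel with
    | zero => simp at hf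
    | succ n =>
      rw [PySem.Chars.splitOn.go]
      have hp : ['-','>'].isPrefixOf ('-' :: '>' :: t) = true := by
        simp [List.isPrefixOf]
      rw [if_pos hp]
      have hdrop : List.drop (['-','>'] : List Char).length ('-' :: '>' :: t) = t := rfl
      rw [hdrop, pvGo_acc]
      have hlen : t.length ≤ n := by simp at hf; omega
      rw [pvGo_fuel n (t.length + 1) _ _ hlen (by omega)]
      simp [PySem.Chars.splitOn]
  | cons c a' ih =>
    cases fuel with
    | zero => simp at hf
    | succ n =>
      have hcons : (c :: a') ++ ['-','>'] ++ t = c :: (a' ++ ['-','>'] ++ t) := by simp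
      rw [hcons, PySem.Chars.splitOn.go]
      have hc : c ≠ '-' := fun hc => ha (by simp [hc])
      have hp : ¬ (['-','>'].isPrefixOf (c :: (a' ++ ['-','>'] ++ t)) = true) := by
        intro hpre
        rw [List.isPrefixOf_iff_prefix] at hpre
        obtain ⟨u, hu⟩ := hpre
        simp at hu
        exact hc hu.1.symm
      rw [if_neg hp]
      have ha' : '-' ∉ a' := fun h => ha (List.mem_cons_of_mem _ h)
      have hf' : (a' ++ ['-','>'] ++ t).length ≤ n := by simp at hf ⊢; omega
      rw [ih n (c :: cur) hf' ha']
      simp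

-- if there are at least two pieces, the head is the text before an occurrence of the separator
theorem pvGo_head (fuel : Nat) (l cur : List Char) (hf : l.length ≤ fuel)
    (h2 : 2 ≤ (PySem.Chars.splitOn.go ['-','>'] fuel l cur []).length) :
    ∃ a t, l = a ++ ['-','>'] ++ t ∧
      (PySem.Chars.splitOn.go ['-','>'] fuel l cur []).headI = cur.reverse ++ a := by
  induction fuel generalizing l cur with
  | zero =>
    exfalso
    simp [PySem.Chars.splitOn.go] at h2
  | succ n ih =>
    cases l with
    | nil =>
      exfalso
      simp [PySem.Chars.splitOn.go] at h2
    | cons c rest =>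
      rw [PySem.Chars.splitOn.go] at h2 ⊢
      by_cases hp : ['-','>'].isPrefixOf (c :: rest) = true
      · rw [if_pos hp] at h2 ⊢
        have hp' := hp
        rw [List.isPrefixOf_iff_prefix] at hp'
        obtain ⟨u, hu⟩ := hp'
        refine ⟨[], List.drop (['-','>'] : List Char).length (c :: rest), ?_, ?_⟩
        · rw [List.nil_append]
          rw [← hu]
          simp
        · rw [pvGo_acc]
          simp
      · rw [if_neg hp] at h2 ⊢
        have hr : rest.length ≤ n := by simp at hf; omega
        obtain ⟨a', t, heq, hhead⟩ := ih rest (c :: cur) hr h2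
        refine ⟨c :: a', t, by simp [heq], ?_⟩
        rw [hhead]
        simp

-- the per-item bridge: A's branch test equals B's "≥ 2 segments whose lowercased head is the key"
theorem pvCond_char (KL : List Char) (hKL : ∀ c ∈ KL, 97 ≤ c.toNat ∧ c.toNat ≤ 122)
    (s : List Char) :
    (PySem.Chars.startswith (PySem.Chars.lower s) (KL ++ ['-','>']) = true)
      ↔ 2 ≤ (PySem.Chars.splitOn s ['-','>']).length ∧
        PySem.Chars.lower ((PySem.Chars.splitOn s ['-','>']).headI) = KL := by
  constructor
  · intro h
    rw [PySem.Chars.startswith_iff] at h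
    obtain ⟨r, hr⟩ := h
    rw [List.append_assoc] at hr
    have hmap : List.map PySem.Chars.lowerChar s = KL ++ (['-','>'] ++ r) := by
      rw [hr]; rfl
    rw [List.map_eq_append_iff] at hmap
    obtain ⟨k', s₂, hs, hk', hs₂⟩ := hmap
    rw [List.map_eq_append_iff] at hs₂
    obtain ⟨sp, t, hs₂eq, hsp, ht⟩ := hs₂
    -- sp maps to ['-','>'], so sp = ['-','>']
    have hlen2 : sp.length = 2 := by
      have := congrArg List.length hsp
      simpa using this
    obtain ⟨c1, c2, rfl⟩ := List.length_eq_two.mp hlen2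
    simp only [List.map_cons, List.map_nil, List.cons.injEq, and_true] at hsp
    have e1 := pvLowerChar_dash hsp.1
    have e2 := pvLowerChar_gt hsp.2
    have hseq : s = k' ++ ['-','>'] ++ t := by
      rw [hs, hs₂eq, e1, e2, List.append_assoc]
    have hnd : '-' ∉ k' := by
      intro hm
      have hmem : PySem.Chars.lowerChar '-' ∈ KL := by
        rw [← hk']; exact List.mem_map_of_mem hm
      rw [show PySem.Chars.lowerChar '-' = '-' from by decide] at hmem
      obtain ⟨hx, -⟩ := hKL _ hmem
      rw [show ('-').toNat = 45 from rfl] at hx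
      omega
    have hsplit : PySem.Chars.splitOn s ['-','>'] = k' :: PySem.Chars.splitOn t ['-','>'] := by
      conv_lhs => rw [PySem.Chars.splitOn]
      rw [hseq]
      exact pvGo_skip k' _ t [] (Nat.le_succ _) hnd
    rw [hsplit]
    refine ⟨?_, ?_⟩
    · have hne : PySem.Chars.splitOn t ['-','>'] ≠ [] := pvGo_ne (t.length + 1) t []
      have hpos : 0 < (PySem.Chars.splitOn t ['-','>']).length := List.length_pos_of_ne_nil hne
      simp only [List.length_cons]
      omega
    · simpa [PySem.Chars.lower] using hk'
  · rintro ⟨h2, hh⟩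
    unfold PySem.Chars.splitOn at h2 hh
    obtain ⟨a, t, heq, hhead⟩ := pvGo_head (s.length + 1) s [] (by omega) h2
    rw [hhead] at hh
    simp only [List.reverse_nil, List.nil_append] at hh
    simp only [PySem.Chars.lower] at hh
    rw [PySem.Chars.startswith_iff]
    refine ⟨PySem.Chars.lower t, ?_⟩
    rw [heq]
    simp only [PySem.Chars.lower, List.map_append]
    rw [hh, show List.map PySem.Chars.lowerChar ['-','>'] = ['-','>'] from by decide]

-- per-item preservation of the invariant
set_option maxRecDepth 10000 in
theorem pvStep_inv (item : String) (st : Option String × Option String) (d : PySem.Dict String String)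
    (h1 : st.1 = d.get? "existingfilename") (h2 : st.2 = d.get? "newfilename") :
    (pvAStep st item).1 = (pvBStep d item).get? "existingfilename" ∧
    (pvAStep st item).2 = (pvBStep d item).get? "newfilename" := by
  have htl : ("->" : String).toList = ['-','>'] := by decide
  have hsplit : PySem.Str.split? item "->"
      = some ((PySem.Chars.splitOn item.toList ['-','>']).map String.ofList) := by
    simp [PySem.Str.split?, PySem.Chars.split?, htl]
  have hl1 : "existingfilename".toList = ['e','x','i','s','t','i','n','g','f','i','l','e','n','a','m','e'] := by decide
  have hl2 : "newfilename".toList = ['n','e','w','f','i','l','e','n','a','m','e'] := by decide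
  have hk1 : ∀ c ∈ "existingfilename".toList, 97 ≤ c.toNat ∧ c.toNat ≤ 122 := by
    rw [hl1]; intro c hc; fin_cases hc <;> exact ⟨by decide, by decide⟩
  have hk2 : ∀ c ∈ "newfilename".toList, 97 ≤ c.toNat ∧ c.toNat ≤ 122 := by
    rw [hl2]; intro c hc; fin_cases hc <;> exact ⟨by decide, by decide⟩
  have hlit1 : "existingfilename->".toList = "existingfilename".toList ++ ['-','>'] := by decide
  have hlit2 : "newfilename->".toList = "newfilename".toList ++ ['-','>'] := by decide
  have hA1 : (PySem.Str.startswith (PySem.Str.lower item) "existingfilename->" = true)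
      ↔ 2 ≤ (PySem.Chars.splitOn item.toList ['-','>']).length ∧
        PySem.Chars.lower ((PySem.Chars.splitOn item.toList ['-','>']).headI) = "existingfilename".toList := by
    rw [PySem.Str.startswith_eq, PySem.Str.toList_lower, hlit1]
    exact pvCond_char "existingfilename".toList hk1 item.toList
  have hA2 : (PySem.Str.startswith (PySem.Str.lower item) "newfilename->" = true)
      ↔ 2 ≤ (PySem.Chars.splitOn item.toList ['-','>']).length ∧
        PySem.Chars.lower ((PySem.Chars.splitOn item.toList ['-','>']).headI) = "newfilename".toList := by
    rw [PySem.Str.startswith_eq, PySem.Str.toList_lower, hlit2]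
    exact pvCond_char "newfilename".toList hk2 item.toList
  have hSne : ("newfilename" : String) ≠ "existingfilename" :=
    fun h => absurd (congrArg String.toList h) (by decide)
  unfold pvAStep pvBStep pvAVal
  rw [hsplit]
  simp only [Option.getD_some]
  by_cases hlen : 2 ≤ (PySem.Chars.splitOn item.toList ['-','>']).length
  · obtain ⟨s0, s1, srest, hsegs⟩ :
        ∃ s0 s1 srest, PySem.Chars.splitOn item.toList ['-','>'] = s0 :: s1 :: srest := by
      rcases e : PySem.Chars.splitOn item.toList ['-','>'] with _ | ⟨s0, _ | ⟨s1, srest⟩⟩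
      · rw [e] at hlen; simp at hlen
      · rw [e] at hlen; simp at hlen
      · exact ⟨s0, s1, srest, rfl⟩
    rw [hsegs] at hA1 hA2 ⊢
    simp only [List.map_cons, List.headI] at hA1 hA2 ⊢
    rw [if_pos (show 2 ≤ (String.ofList s0 :: String.ofList s1 :: List.map String.ofList srest).length by
      simp only [List.length_cons]; omega)]
    have hg0 : (PySem.List.pyGet? (String.ofList s0 :: String.ofList s1 :: List.map String.ofList srest) 0).getD "" = String.ofList s0 := by
      simp [PySem.List.pyGet?, PySem.List.pyIdx?]
      split
      next h => simp
      next h => exfalso; omega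
    have hg1 : (PySem.List.pyGet? (String.ofList s0 :: String.ofList s1 :: List.map String.ofList srest) 1).getD "" = String.ofList s1 := by
      simp [PySem.List.pyGet?, PySem.List.pyIdx?]
    rw [hg0, hg1]
    have hkeyL : (PySem.Str.lower (String.ofList s0)).toList = PySem.Chars.lower s0 := by
      rw [PySem.Str.toList_lower]
      simp
    by_cases hks1 : PySem.Chars.lower s0 = "existingfilename".toList
    · have hb1 : PySem.Str.startswith (PySem.Str.lower item) "existingfilename->" = true :=
        hA1.mpr ⟨by simp only [List.length_cons]; omega, hks1⟩
      have hkey : PySem.Str.lower (String.ofList s0) = "existingfilename" := by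
        rw [← String.toList_inj, hkeyL]; exact hks1
      rw [if_pos hb1, hkey]
      refine ⟨?_, ?_⟩
      · exact (PySem.Dict.get?_insert_self d _ _).symm
      · rw [PySem.Dict.get?_insert_of_ne d _ hSne]
        exact h2
    · by_cases hks2 : PySem.Chars.lower s0 = "newfilename".toList
      · have hb1 : ¬ (PySem.Str.startswith (PySem.Str.lower item) "existingfilename->" = true) :=
          fun h => hks1 (hA1.mp h).2
        have hb2 : PySem.Str.startswith (PySem.Str.lower item) "newfilename->" = true :=
          hA2.mpr ⟨by simp only [List.length_cons]; omega, hks2⟩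
        have hkey : PySem.Str.lower (String.ofList s0) = "newfilename" := by
          rw [← String.toList_inj, hkeyL]; exact hks2
        rw [if_neg hb1, if_pos hb2, hkey]
        refine ⟨?_, ?_⟩
        · rw [PySem.Dict.get?_insert_of_ne d _ (Ne.symm hSne)]
          exact h1
        · exact (PySem.Dict.get?_insert_self d _ _).symm
      · have hb1 : ¬ (PySem.Str.startswith (PySem.Str.lower item) "existingfilename->" = true) :=
          fun h => hks1 (hA1.mp h).2
        have hb2 : ¬ (PySem.Str.startswith (PySem.Str.lower item) "newfilename->" = true) :=
          fun h => hks2 (hA2.mp h).2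
        have hne1 : PySem.Str.lower (String.ofList s0) ≠ "existingfilename" := by
          intro h; exact hks1 (by rw [← hkeyL, h])
        have hne2 : PySem.Str.lower (String.ofList s0) ≠ "newfilename" := by
          intro h; exact hks2 (by rw [← hkeyL, h])
        rw [if_neg hb1, if_neg hb2]
        refine ⟨?_, ?_⟩
        · rw [PySem.Dict.get?_insert_of_ne d _ (Ne.symm hne1)]
          exact h1
        · rw [PySem.Dict.get?_insert_of_ne d _ (Ne.symm hne2)]
          exact h2
  · have hb1 : ¬ (PySem.Str.startswith (PySem.Str.lower item) "existingfilename->" = true) :=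
      fun h => hlen (hA1.mp h).1
    have hb2 : ¬ (PySem.Str.startswith (PySem.Str.lower item) "newfilename->" = true) :=
      fun h => hlen (hA2.mp h).1
    rw [if_neg hb1, if_neg hb2, if_neg (by simpa using hlen)]
    exact ⟨h1, h2⟩

-- the loop invariant: A's running pair is exactly the two lookups in B's running dict
theorem pvLoop (parts : List String) :
    ∀ (st : Option String × Option String) (d : PySem.Dict String String),
    st.1 = d.get? "existingfilename" → st.2 = d.get? "newfilename" →
    parts.foldl pvAStep st
      = ((parts.foldl pvBStep d).get? "existingfilename",
         (parts.foldl pvBStep d).get? "newfilename") := by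
  induction parts with
  | nil =>
    intro st d h1 h2
    simp only [List.foldl_nil]
    cases st
    simp_all
  | cons item rest ih =>
    intro st d h1 h2
    simp only [List.foldl_cons]
    obtain ⟨g1, g2⟩ := pvStep_inv item st d h1 h2
    exact ih _ _ g1 g2

-- ===== VERDICT (by name: the statement is the Claim_ definition above) =====
theorem getSourceDestination_spec : Claim_equal_getSourceDestination := by
  intro parts _
  unfold Spec_getSourceDestination getSourceDestination getSourceDestination_alt
  exact pvLoop parts (none, none) ∅ rfl rfl
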